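-- pv_equiv track=rewrite | github.com/CSID-DGU/2020-2-OSSP1-AMBB-7 | PolyLine_Link/PolyLine_Link/PolyLine_Extraction.py | min_xy
-- ===== SOURCE A (Python) =====
-- def min_xy(list_point):  # 최소 좌표 탐색
--     min_x = list_point[0][0]
--     min_y = list_point[0][1]
--     for x in range(1, len(list_point)):
--         if list_point[x][0] < min_x:
--             min_x = list_point[x][0]
--         if list_point[x][1] < min_y:
--             min_y = list_point[x][1]
--     return min_x, min_y
-- ===== SOURCE B (Python) =====
-- def min_xy(list_point):  # 최소 좌표 탐색
--     min_x = min(p[0] for p in list_point)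
--     min_y = min(p[1] for p in list_point)
--     return min_x, min_y
-- ===== Notes on version B (the rewrite author's own statement) =====
-- stated objective: idiomatic
-- what changed: Replaced the manual indexed loop keeping two running minima with two independent min() passes over the coordinate projections.
import Mathlib
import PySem

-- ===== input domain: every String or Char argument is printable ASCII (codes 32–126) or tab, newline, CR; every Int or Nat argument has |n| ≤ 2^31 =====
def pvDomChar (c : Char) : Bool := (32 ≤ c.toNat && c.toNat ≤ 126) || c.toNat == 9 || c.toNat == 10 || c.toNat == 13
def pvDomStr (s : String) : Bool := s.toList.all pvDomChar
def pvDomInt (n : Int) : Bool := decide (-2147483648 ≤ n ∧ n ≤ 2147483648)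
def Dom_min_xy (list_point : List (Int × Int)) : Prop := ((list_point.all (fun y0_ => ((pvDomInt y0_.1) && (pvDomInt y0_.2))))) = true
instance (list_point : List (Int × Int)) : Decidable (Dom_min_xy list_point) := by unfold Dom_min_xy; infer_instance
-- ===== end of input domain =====

-- B replaces the fused indexed running-minima loop with two independent min() passes (idiomatic; same cost).

-- ===== PORT A =====
def min_xy (list_point : List (Int × Int)) : Int × Int :=
  let min_x := (PySem.List.pyGetD list_point 0 (0, 0)).1
  let min_y := (PySem.List.pyGetD list_point 0 (0, 0)).2
  (PySem.List.pyRange 1 (PySem.List.len list_point) 1).foldl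
    (fun (s : Int × Int) x =>
      let p := PySem.List.pyGetD list_point x (0, 0)
      let mx := if p.1 < s.1 then p.1 else s.1
      let my := if p.2 < s.2 then p.2 else s.2
      (mx, my)) (min_x, min_y)

-- ===== PORT B =====
def min_xy_alt (list_point : List (Int × Int)) : Int × Int :=
  let min_x := (PySem.List.min? (list_point.map Prod.fst) (fun y => y)).getD 0
  let min_y := (PySem.List.min? (list_point.map Prod.snd) (fun y => y)).getD 0
  (min_x, min_y)

-- ===== PRECONDITION & SPEC =====
-- Pre_ excludes only the empty list, on which A raises IndexError (and B raises ValueError).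
def Pre_min_xy (list_point : List (Int × Int)) : Prop := list_point ≠ []
instance (list_point : List (Int × Int)) : Decidable (Pre_min_xy list_point) := by unfold Pre_min_xy; infer_instance
def pvWitness_min_xy : (List (Int × Int)) := [(3, -2), (1, 5)]
def Spec_min_xy (list_point : List (Int × Int)) (out : Int × Int) : Prop := out = min_xy_alt list_point
instance (list_point : List (Int × Int)) (out : Int × Int) : Decidable (Spec_min_xy list_point out) := by unfold Spec_min_xy; infer_instance

-- ===== CLAIM (what is proved, stated in full; the proofs are below) =====
def Claim_equal_min_xy : Prop := ∀ (list_point : List (Int × Int)), Dom_min_xy list_point → Pre_min_xy list_point → Spec_min_xy list_point (min_xy list_point)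

-- ===== LEMMAS AND PROOFS =====
theorem min_xy_cons (p : Int × Int) (t : List (Int × Int)) :
    min_xy (p :: t) = ((t.map Prod.fst).foldl min p.1, (t.map Prod.snd).foldl min p.2) := by
  unfold min_xy
  have h := PySem.List.foldl_pyRange_pyGetD (xs := p :: t) (a := 1) (d := (0, 0))
    (f := fun (s : Int × Int) (q : Int × Int) =>
      (if q.1 < s.1 then q.1 else s.1, if q.2 < s.2 then q.2 else s.2))
    (init := (p.1, p.2)) (by norm_num)
  simp only [PySem.List.len] at h ⊢
  rw [show PySem.List.pyGetD (p :: t) (0 : Int) ((0 : Int), (0 : Int)) = p by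
    simp [PySem.List.pyGetD, PySem.List.pyGet?, PySem.List.pyIdx?], h]
  simp only [List.foldl_map]
  have : ∀ (s q : Int × Int),
      (if q.1 < s.1 then q.1 else s.1, if q.2 < s.2 then q.2 else s.2) =
      ((fun (a : Int) (e : Int × Int) => min a e.1) s.1 q,
       (fun (a : Int) (e : Int × Int) => min a e.2) s.2 q) := by
    intro s q
    simp only [min_def, Prod.mk.injEq]
    constructor <;> split_ifs <;> omega
  rw [show List.drop (Int.toNat 1) (p :: t) = t by simp,
    funext fun s => funext fun q => this s q,
    PySem.List.foldl_prod_mk (f := fun (a : Int) (e : Int × Int) => min a e.1)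
      (g := fun (a : Int) (e : Int × Int) => min a e.2)]

-- ===== VERDICT (by name: the statement is the Claim_ definition above) =====
theorem min_xy_spec : Claim_equal_min_xy := by
  intro l _ hpre
  cases l with
  | nil => exact absurd rfl hpre
  | cons p t =>
    unfold Spec_min_xy min_xy_alt
    rw [min_xy_cons]
    simp [PySem.List.min?_id_cons, List.foldl_map]
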